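-- pv_equiv track=rewrite | github.com/yesandnoandperhaps/LightweightNotepad | lightweight_notepad/window_module/ZiWeiDouShuWindow.py | accumulate_vector
-- ===== SOURCE A (Python) =====
-- def accumulate_vector(initial_vector, increment=10, times=11, reverse_result=False):
--     result = []
--     vector = initial_vector[:]
--
--     for _ in range(times):
--         vector = [x + increment for x in vector]
--         result.append(f"{vector[0]}-{vector[1]}")
--
--     # 根据参数选择是否翻转结果
--     if reverse_result:
--         result.reverse()
--
--     return [f"{initial_vector[0]}-{initial_vector[1]}"] + result
-- ===== SOURCE B (Python) =====
-- def accumulate_vector(initial_vector, increment=10, times=11, reverse_result=False):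
--     a, b = initial_vector[0], initial_vector[1]
--     n = max(times, 0)
--     ks = range(n, 0, -1) if reverse_result else range(1, n + 1)
--     return [f"{a}-{b}"] + [f"{a + k * increment}-{b + k * increment}" for k in ks]
-- ===== Notes on version B (the rewrite author's own statement) =====
-- stated objective: faster
-- what changed: B never copies or rewrites the vector: it reads elements 0 and 1 once and emits each row from the closed form initial + k*increment over a (possibly descending) range, instead of A's repeated list-comprehension rewrite of the whole vector each iteration.
import Mathlib
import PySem

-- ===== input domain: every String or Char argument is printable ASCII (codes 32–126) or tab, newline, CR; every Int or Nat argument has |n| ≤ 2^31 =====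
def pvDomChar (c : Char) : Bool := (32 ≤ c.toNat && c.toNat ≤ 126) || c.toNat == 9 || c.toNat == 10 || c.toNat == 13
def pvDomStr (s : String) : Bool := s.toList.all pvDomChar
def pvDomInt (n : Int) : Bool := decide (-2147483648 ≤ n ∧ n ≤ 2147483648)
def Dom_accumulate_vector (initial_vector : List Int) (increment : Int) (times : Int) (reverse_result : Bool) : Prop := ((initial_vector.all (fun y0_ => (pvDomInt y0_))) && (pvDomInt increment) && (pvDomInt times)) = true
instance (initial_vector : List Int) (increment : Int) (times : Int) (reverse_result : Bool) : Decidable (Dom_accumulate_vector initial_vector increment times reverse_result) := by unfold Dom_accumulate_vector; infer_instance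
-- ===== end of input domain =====

-- B reads only elements 0 and 1 and emits each row by the closed form initial + k*increment (O(times)),
-- instead of A's rewrite of the whole vector every iteration (O(times*len)); faster asymptotically in len.


-- shared port of the f-string f"{x}-{y}"
def pvFmt (x y : Int) : String := PySem.Int.toStr x ++ "-" ++ PySem.Int.toStr y

-- ===== PORT A =====
-- one body of A's 'for _ in range(times)' loop (state: vector, result)
def avStep (increment : Int) (st : List Int × List String) (_ : Int) : List Int × List String :=
  let vector := st.1.map (fun x => x + increment)
  (vector, st.2 ++ [pvFmt (PySem.List.pyGetD vector 0 0) (PySem.List.pyGetD vector 1 0)])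

def accumulate_vector (initial_vector : List Int) (increment : Int) (times : Int) (reverse_result : Bool) : List String :=
  let st := (PySem.List.pyRange 0 times 1).foldl (avStep increment) (initial_vector, ([] : List String))
  let result := if reverse_result then st.2.reverse else st.2
  [pvFmt (PySem.List.pyGetD initial_vector 0 0) (PySem.List.pyGetD initial_vector 1 0)] ++ result

-- ===== PORT B =====
def accumulate_vector_alt (initial_vector : List Int) (increment : Int) (times : Int) (reverse_result : Bool) : List String :=
  let a := PySem.List.pyGetD initial_vector 0 0
  let b := PySem.List.pyGetD initial_vector 1 0
  let n := max times 0
  let ks := if reverse_result then PySem.List.pyRange n 0 (-1) else PySem.List.pyRange 1 (n + 1) 1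
  [pvFmt a b] ++ ks.map (fun k => pvFmt (a + k * increment) (b + k * increment))

-- ===== PRECONDITION & SPEC =====
-- A raises IndexError whenever initial_vector has fewer than 2 elements (vector[1] in the loop or in the final line)
def Pre_accumulate_vector (initial_vector : List Int) (increment : Int) (times : Int) (reverse_result : Bool) : Prop :=
  2 ≤ initial_vector.length
instance (initial_vector : List Int) (increment : Int) (times : Int) (reverse_result : Bool) : Decidable (Pre_accumulate_vector initial_vector increment times reverse_result) := by unfold Pre_accumulate_vector; infer_instance
def pvWitness_accumulate_vector : List Int × Int × Int × Bool := ([3, 7], 10, 2, false)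

def Spec_accumulate_vector (initial_vector : List Int) (increment : Int) (times : Int) (reverse_result : Bool) (out : List String) : Prop := out = accumulate_vector_alt initial_vector increment times reverse_result
instance (initial_vector : List Int) (increment : Int) (times : Int) (reverse_result : Bool) (out : List String) : Decidable (Spec_accumulate_vector initial_vector increment times reverse_result out) := by unfold Spec_accumulate_vector; infer_instance

-- ===== CLAIM (what is proved, stated in full; the proofs are below) =====
def Claim_equal_accumulate_vector : Prop := ∀ (initial_vector : List Int) (increment : Int) (times : Int) (reverse_result : Bool), Dom_accumulate_vector initial_vector increment times reverse_result → Pre_accumulate_vector initial_vector increment times reverse_result → Spec_accumulate_vector initial_vector increment times reverse_result (accumulate_vector initial_vector increment times reverse_result)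

-- ===== LEMMAS AND PROOFS =====

-- A's loop on a vector a :: b :: rest: after |l| iterations the vector is shifted by |l|*increment and
-- the j-th emitted row shows the vector after j+1 increments.
theorem avStep_foldl (inc : Int) (l : List Int) (a b : Int) (rest : List Int) (res : List String) :
    l.foldl (avStep inc) (a :: b :: rest, res) =
      ((a + (l.length : Int) * inc) :: (b + (l.length : Int) * inc) :: rest.map (fun x => x + (l.length : Int) * inc),
       res ++ (List.range l.length).map (fun j : Nat => pvFmt (a + ((j : Int) + 1) * inc) (b + ((j : Int) + 1) * inc))) := by
  induction l generalizing a b rest res with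
  | nil => simp
  | cons x l ih =>
    have h01 : (0 : Int) ≤ (rest.length : Int) + 1 := by omega
    rw [List.foldl_cons,
      show avStep inc (a :: b :: rest, res) x =
          ((a + inc) :: (b + inc) :: rest.map (fun y => y + inc), res ++ [pvFmt (a + inc) (b + inc)]) from by
        simp [avStep, PySem.List.pyGetD, PySem.List.pyIdx?, PySem.List.pyGet?, h01],
      ih]
    refine Prod.ext ?_ ?_
    · simp only [List.map_map, List.length_cons, List.cons.injEq]
      refine ⟨by push_cast; ring, by push_cast; ring, ?_⟩
      refine List.map_congr_left fun y _ => ?_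
      simp only [Function.comp]
      push_cast; ring
    · simp only [List.length_cons, List.range_succ_eq_map, List.map_cons, List.map_map,
        List.append_assoc, List.singleton_append, List.append_cancel_left_eq, List.cons.injEq]
      refine ⟨by norm_num, ?_⟩
      refine List.map_congr_left fun j _ => ?_
      simp only [Function.comp]
      push_cast; ring

-- ===== VERDICT (by name: the statement is the Claim_ definition above) =====
theorem accumulate_vector_spec : Claim_equal_accumulate_vector := by
  intro init inc t rev _ hpre
  obtain ⟨a, b, rest, rfl⟩ : ∃ a b rest, init = a :: b :: rest := by
    match init, hpre with
    | a :: b :: rest, _ => exact ⟨a, b, rest, rfl⟩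
  unfold Spec_accumulate_vector accumulate_vector accumulate_vector_alt
  have hget0 : PySem.List.pyGetD (a :: b :: rest) 0 0 = a := by
    simp [PySem.List.pyGetD_zero_cons]
  have hget1 : PySem.List.pyGetD (a :: b :: rest) 1 0 = b := by
    simp [PySem.List.pyGetD, PySem.List.pyIdx?, PySem.List.pyGet?]
  have ht : PySem.List.pyRange 0 t 1 = PySem.List.pyRange 0 (max t 0) 1 := by
    rcases (by omega : t ≤ 0 ∨ 0 < t) with h | h
    · rw [PySem.List.pyRange_one_eq_nil h, PySem.List.pyRange_one_eq_nil (by omega)]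
    · rw [max_eq_left h.le]
  have hasc : (PySem.List.pyRange 1 (max t 0 + 1) 1).map (fun k => pvFmt (a + k * inc) (b + k * inc)) =
      (List.range (PySem.List.pyRange 0 (max t 0) 1).length).map
        (fun j : Nat => pvFmt (a + ((j : Int) + 1) * inc) (b + ((j : Int) + 1) * inc)) := by
    rw [PySem.List.pyRange_one 1 (max t 0 + 1), List.map_map, PySem.List.length_pyRange_one,
      show (max t 0 + 1 - 1).toNat = (max t 0 - 0).toNat by omega]
    refine List.map_congr_left fun j _ => ?_
    simp only [Function.comp]
    ring_nf
  rw [ht, avStep_foldl]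
  cases rev with
  | false =>
    simp only [Bool.false_eq_true, if_false, hget0, hget1, List.nil_append, hasc]
  | true =>
    simp only [if_true, hget0, hget1, List.nil_append,
      PySem.List.pyRange_neg_one_eq_reverse, List.map_reverse, zero_add, hasc]
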